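-- pv_equiv track=rewrite | github.com/NISH1001/playx | playx/playlist/youtube.py | _get_url_slicer
-- ===== SOURCE A (Python) =====
-- def _get_url_slicer(url):
--     slicers = []
--     strings = ["&index=", "&t=", "&list="]
--     for s in strings:
--         try:
--             slicer = url.index(s)
--             slicers.append(slicer)
--         except ValueError:
--             continue
--     return min(slicers)
-- ===== SOURCE B (Python) =====
-- def _has_marker(tail):
--     return tail.startswith("&index=") or tail.startswith("&t=") or tail.startswith("&list=")
--
--
-- def _get_url_slicer(url):
--     # single left-to-right scan: return the first position where any marker begins
--     for i in range(len(url)):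
--         if _has_marker(url[i:]):
--             return i
--     raise ValueError("no slicer marker found in url")
-- ===== Notes on version B (the rewrite author's own statement) =====
-- stated objective: alternative
-- what changed: Replaces three separate str.index scans collected into a list and reduced with min() by one left-to-right scan that returns the first position where any of the three markers starts.
import Mathlib
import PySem

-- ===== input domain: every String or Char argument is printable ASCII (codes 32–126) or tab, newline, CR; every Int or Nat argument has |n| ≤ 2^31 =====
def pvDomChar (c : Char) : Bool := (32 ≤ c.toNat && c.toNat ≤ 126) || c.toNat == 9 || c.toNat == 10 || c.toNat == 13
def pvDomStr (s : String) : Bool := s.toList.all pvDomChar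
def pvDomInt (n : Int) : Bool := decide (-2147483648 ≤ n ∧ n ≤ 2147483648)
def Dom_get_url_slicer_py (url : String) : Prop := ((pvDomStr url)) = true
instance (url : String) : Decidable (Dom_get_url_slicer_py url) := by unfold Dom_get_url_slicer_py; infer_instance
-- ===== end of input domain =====

-- B replaces A's three str.index scans + min() reduction by one left-to-right scan
-- returning the first position where any marker starts (alternative decomposition).

-- ===== PORT A =====
def get_url_slicer_py (url : String) : Int :=
  let strings : List String := ["&index=", "&t=", "&list="]
  let slicers : List Int := strings.foldl (fun acc s =>
    let f := PySem.Str.find url s          -- url.index(s): raises ValueError iff find = -1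
    if f = -1 then acc else acc ++ [f]) ([] : List Int)
  -- min(slicers): raises ValueError on the empty list — excluded by Pre_; total form getD 0
  (PySem.List.min? slicers (fun x => x)).getD 0

-- ===== PORT B =====
-- _has_marker(tail)
def pvHasMarker (t : List Char) : Bool :=
  PySem.Chars.startswith t "&index=".toList || PySem.Chars.startswith t "&t=".toList ||
    PySem.Chars.startswith t "&list=".toList

-- the 'for i in range(len(url)): if _has_marker(url[i:]): return i' loop; the suffix url[i:]
-- is exactly the list the recursion walks.  -1 stands for the final 'raise' (outside Pre_).
def pvScan : List Char → Nat → Int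
  | [], _ => -1
  | c :: rest, i => if pvHasMarker (c :: rest) then (i : Int) else pvScan rest (i + 1)

def get_url_slicer_py_alt (url : String) : Int := pvScan url.toList 0

-- ===== PRECONDITION & SPEC =====
-- A raises ValueError (min of an empty list) exactly when no marker occurs in url.
def Pre_get_url_slicer_py (url : String) : Prop :=
  PySem.Str.isIn "&index=" url = true ∨ PySem.Str.isIn "&t=" url = true ∨
    PySem.Str.isIn "&list=" url = true
instance (url : String) : Decidable (Pre_get_url_slicer_py url) := by
  unfold Pre_get_url_slicer_py; infer_instance

def pvWitness_get_url_slicer_py : String := "x&t=1&list=ab"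

def Spec_get_url_slicer_py (url : String) (out : Int) : Prop := out = get_url_slicer_py_alt url
instance (url : String) (out : Int) : Decidable (Spec_get_url_slicer_py url out) := by
  unfold Spec_get_url_slicer_py; infer_instance

-- ===== CLAIM (what is proved, stated in full; the proofs are below) =====
def Claim_equal_get_url_slicer_py : Prop := ∀ (url : String), Dom_get_url_slicer_py url →
  Pre_get_url_slicer_py url → Spec_get_url_slicer_py url (get_url_slicer_py url)

-- ===== LEMMAS AND PROOFS =====

theorem pvHasMarker_iff (t : List Char) : pvHasMarker t = true ↔
    ("&index=".toList <+: t ∨ "&t=".toList <+: t ∨ "&list=".toList <+: t) := by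
  simp [pvHasMarker, PySem.Chars.startswith_iff, or_assoc]

theorem pvNoPref (l p : List Char) (h : PySem.Chars.isIn p l = false) (j : Nat) :
    ¬ p <+: l.drop j := by
  intro hp
  have := (PySem.Chars.exists_prefix_drop_iff_isIn (sub := p) (s := l)).mp ⟨j, hp⟩
  simp [h] at this

theorem pvLowPref (l p : List Char) (j : Nat) (hj : (j : Int) < PySem.Chars.find l p) :
    ¬ p <+: l.drop j := by
  have h0 : 0 ≤ PySem.Chars.find l p := by omega
  have := (PySem.Chars.find_spec (s := l) (sub := p) h0).2 j (by omega)
  exact this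

theorem pvScan_eq (l : List Char) (i k : Nat)
    (hk : pvHasMarker (l.drop k) = true)
    (hmin : ∀ j, j < k → pvHasMarker (l.drop j) = false) :
    pvScan l i = ((i + k : Nat) : Int) := by
  induction l generalizing i k with
  | nil => simp at hk; exact absurd hk (by decide)
  | cons c rest ih =>
    by_cases h : pvHasMarker (c :: rest) = true
    · have hk0 : k = 0 := by
        by_contra hne
        have := hmin 0 (by omega)
        simp [h] at this
      subst hk0
      simp [pvScan, h]
    · have hkpos : k ≠ 0 := by
        intro h0; subst h0; simp at hk; exact h hk
      have hstep : pvScan (c :: rest) i = pvScan rest (i + 1) := by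
        simp [pvScan, h]
      rw [hstep, ih (i + 1) (k - 1)
        (by rw [show rest.drop (k - 1) = (c :: rest).drop k by
              cases k with | zero => omega | succ n => simp]; exact hk)
        (fun j hj => by
          have := hmin (j + 1) (by omega)
          simpa using this)]
      congr 1
      omega

-- A k that is hit and below every marker occurrence is what pvScan returns
theorem pvScan_eq_of (l : List Char) (k : Nat)
    (hhit : pvHasMarker (l.drop k) = true)
    (h1 : ∀ j, j < k → ¬ "&index=".toList <+: l.drop j)
    (h2 : ∀ j, j < k → ¬ "&t=".toList <+: l.drop j)
    (h3 : ∀ j, j < k → ¬ "&list=".toList <+: l.drop j) :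
    pvScan l 0 = (k : Int) := by
  have := pvScan_eq l 0 k hhit (fun j hj => by
    cases hb : pvHasMarker (l.drop j) with
    | false => rfl
    | true =>
      rcases (pvHasMarker_iff _).mp hb with h | h | h
      · exact absurd h (h1 j hj)
      · exact absurd h (h2 j hj)
      · exact absurd h (h3 j hj))
  simpa using this

theorem pvBound (l p : List Char) (k : Nat) (h : (k : Int) ≤ PySem.Chars.find l p) :
    ∀ j, j < k → ¬ p <+: l.drop j := fun j hj => pvLowPref l p j (by omega)

theorem pvAbsent (l p : List Char) (h : PySem.Chars.find l p = -1) (j : Nat) :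
    ¬ p <+: l.drop j := by
  apply pvNoPref
  rw [PySem.Chars.isIn_eq_false_iff]
  exact (PySem.Chars.find_eq_neg_one_iff (s := l) (sub := p)).mp h

theorem pvPrefAt (l p : List Char) (h : ¬ PySem.Chars.find l p = -1) :
    p <+: l.drop (PySem.Chars.find l p).toNat := by
  have h0 : 0 ≤ PySem.Chars.find l p := by
    have := PySem.Chars.neg_one_le_find (s := l) (sub := p)
    omega
  exact (PySem.Chars.find_spec (s := l) (sub := p) h0).1

theorem get_url_slicer_py_spec : Claim_equal_get_url_slicer_py := by
  intro url _ hpre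
  unfold Spec_get_url_slicer_py get_url_slicer_py get_url_slicer_py_alt Pre_get_url_slicer_py at *
  simp only [PySem.Str.find_eq, PySem.Str.isIn_eq, List.foldl_cons, List.foldl_nil] at *
  set l := url.toList with hl
  set p1 : List Char := "&index=".toList with hp1
  set p2 : List Char := "&t=".toList with hp2
  set p3 : List Char := "&list=".toList with hp3
  set f1 := PySem.Chars.find l p1 with hf1
  set f2 := PySem.Chars.find l p2 with hf2
  set f3 := PySem.Chars.find l p3 with hf3
  have hb1 : (-1 : Int) ≤ f1 := PySem.Chars.neg_one_le_find l p1
  have hb2 : (-1 : Int) ≤ f2 := PySem.Chars.neg_one_le_find l p2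
  have hb3 : (-1 : Int) ≤ f3 := PySem.Chars.neg_one_le_find l p3
  -- Pre_ rules out the all-absent case
  have hne : ¬ (f1 = -1 ∧ f2 = -1 ∧ f3 = -1) := by
    rintro ⟨e1, e2, e3⟩
    rcases hpre with h | h | h
    · rw [(PySem.Chars.isIn_eq_false_iff _ _).mpr ((PySem.Chars.find_eq_neg_one_iff _ _).mp e1)] at h
      exact Bool.false_ne_true h
    · rw [(PySem.Chars.isIn_eq_false_iff _ _).mpr ((PySem.Chars.find_eq_neg_one_iff _ _).mp e2)] at h
      exact Bool.false_ne_true h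
    · rw [(PySem.Chars.isIn_eq_false_iff _ _).mpr ((PySem.Chars.find_eq_neg_one_iff _ _).mp e3)] at h
      exact Bool.false_ne_true h
  by_cases c1 : f1 = -1 <;> by_cases c2 : f2 = -1 <;> by_cases c3 : f3 = -1 <;>
    simp only [c1, c2, c3, if_pos, if_false, List.nil_append, List.cons_append,
      PySem.List.min?_id_cons, List.foldl_cons, List.foldl_nil, Option.getD_some]
  · exact absurd ⟨c1, c2, c3⟩ hne
  · -- only p3 present
    rw [pvScan_eq_of l f3.toNat
      ((pvHasMarker_iff _).mpr (Or.inr (Or.inr (pvPrefAt l p3 c3))))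
      (fun j hj => pvAbsent l p1 c1 j) (fun j hj => pvAbsent l p2 c2 j)
      (pvBound l p3 f3.toNat (by omega))]
    omega
  · -- only p2 present
    rw [pvScan_eq_of l f2.toNat
      ((pvHasMarker_iff _).mpr (Or.inr (Or.inl (pvPrefAt l p2 c2))))
      (fun j hj => pvAbsent l p1 c1 j)
      (pvBound l p2 f2.toNat (by omega))
      (fun j hj => pvAbsent l p3 c3 j)]
    omega
  · -- p2 and p3 present
    have hm : min f2 f3 = f2 ∨ min f2 f3 = f3 := by omega
    have hhit : pvHasMarker (l.drop (min f2 f3).toNat) = true := by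
      rcases hm with hm | hm <;> rw [hm]
      · exact (pvHasMarker_iff _).mpr (Or.inr (Or.inl (pvPrefAt l p2 c2)))
      · exact (pvHasMarker_iff _).mpr (Or.inr (Or.inr (pvPrefAt l p3 c3)))
    rw [pvScan_eq_of l (min f2 f3).toNat hhit
      (fun j hj => pvAbsent l p1 c1 j)
      (pvBound l p2 _ (by omega)) (pvBound l p3 _ (by omega))]
    omega
  · -- only p1 present
    rw [pvScan_eq_of l f1.toNat
      ((pvHasMarker_iff _).mpr (Or.inl (pvPrefAt l p1 c1)))
      (pvBound l p1 f1.toNat (by omega))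
      (fun j hj => pvAbsent l p2 c2 j) (fun j hj => pvAbsent l p3 c3 j)]
    omega
  · -- p1 and p3 present
    have hm : min f1 f3 = f1 ∨ min f1 f3 = f3 := by omega
    have hhit : pvHasMarker (l.drop (min f1 f3).toNat) = true := by
      rcases hm with hm | hm <;> rw [hm]
      · exact (pvHasMarker_iff _).mpr (Or.inl (pvPrefAt l p1 c1))
      · exact (pvHasMarker_iff _).mpr (Or.inr (Or.inr (pvPrefAt l p3 c3)))
    rw [pvScan_eq_of l (min f1 f3).toNat hhit
      (pvBound l p1 _ (by omega))
      (fun j hj => pvAbsent l p2 c2 j) (pvBound l p3 _ (by omega))]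
    omega
  · -- p1 and p2 present
    have hm : min f1 f2 = f1 ∨ min f1 f2 = f2 := by omega
    have hhit : pvHasMarker (l.drop (min f1 f2).toNat) = true := by
      rcases hm with hm | hm <;> rw [hm]
      · exact (pvHasMarker_iff _).mpr (Or.inl (pvPrefAt l p1 c1))
      · exact (pvHasMarker_iff _).mpr (Or.inr (Or.inl (pvPrefAt l p2 c2)))
    rw [pvScan_eq_of l (min f1 f2).toNat hhit
      (pvBound l p1 _ (by omega)) (pvBound l p2 _ (by omega))
      (fun j hj => pvAbsent l p3 c3 j)]
    omega
  · -- all present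
    have hm : min (min f1 f2) f3 = f1 ∨ min (min f1 f2) f3 = f2 ∨ min (min f1 f2) f3 = f3 := by
      omega
    have hhit : pvHasMarker (l.drop (min (min f1 f2) f3).toNat) = true := by
      rcases hm with hm | hm | hm <;> rw [hm]
      · exact (pvHasMarker_iff _).mpr (Or.inl (pvPrefAt l p1 c1))
      · exact (pvHasMarker_iff _).mpr (Or.inr (Or.inl (pvPrefAt l p2 c2)))
      · exact (pvHasMarker_iff _).mpr (Or.inr (Or.inr (pvPrefAt l p3 c3)))
    rw [pvScan_eq_of l (min (min f1 f2) f3).toNat hhit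
      (pvBound l p1 _ (by omega)) (pvBound l p2 _ (by omega)) (pvBound l p3 _ (by omega))]
    omega
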